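-- pv_equiv track=rewrite | github.com/jnarwell/cs_106a_hw | parse1.py | exclamation
-- ===== SOURCE A (Python) =====
-- def exclamation(s):
--     s = s[::-1]
--     e = s.find('!')
--     n = ''
--     if e != -1:
--         while e<len(s):
--             n+=s[e]
--             e+=1
--             if e<len(s) and not s[e].isalpha():
--                 break
--     return n[::-1]
-- ===== SOURCE B (Python) =====
-- def exclamation(s):
--     idx = s.rfind('!')
--     if idx == -1:
--         return ''
--     i = idx - 1
--     while i >= 0 and s[i].isalpha():
--         i -= 1
--     return s[i + 1:idx + 1]
-- ===== Notes on version B (the rewrite author's own statement) =====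
-- stated objective: simpler
-- what changed: B drops A's two full string reversals and forward char-by-char append loop: it locates the last '!' directly with rfind, walks an index leftward over the alphabetic run, and returns one slice.
import Mathlib
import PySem

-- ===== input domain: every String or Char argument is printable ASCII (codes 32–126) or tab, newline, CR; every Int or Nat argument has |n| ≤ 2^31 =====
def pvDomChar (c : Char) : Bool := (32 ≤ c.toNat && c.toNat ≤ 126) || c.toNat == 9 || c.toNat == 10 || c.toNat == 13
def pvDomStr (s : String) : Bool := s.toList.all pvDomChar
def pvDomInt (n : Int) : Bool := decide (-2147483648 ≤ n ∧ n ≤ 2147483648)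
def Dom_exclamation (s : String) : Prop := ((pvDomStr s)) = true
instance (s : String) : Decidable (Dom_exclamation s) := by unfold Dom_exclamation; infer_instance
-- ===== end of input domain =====

-- B replaces A's double reversal + forward char-append loop by rfind plus a backward
-- index walk and one slice (objective: simpler).

-- ===== PORT A =====
-- A's while loop: append s[e], advance, break when the next char exists and is not alphabetic.
def pvALoop (r : List Char) (e : Nat) (n : List Char) : List Char :=
  if he : e < r.length then
    let n' := n ++ [r[e]]
    match r[e + 1]? with
    | some ch => if PySem.Chars.isalpha ch then pvALoop r (e + 1) n' else n'
    | none => pvALoop r (e + 1) n'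
  else n
termination_by r.length - e


def exclamation (s : String) : String :=
  let r := s.toList.reverse                -- s = s[::-1]  (reversal; cf. PySem.List.slice?_none_none_neg_one)
  let e := PySem.Chars.find r ['!']
  let n := if e ≠ -1 then pvALoop r e.toNat [] else []
  String.ofList n.reverse                  -- return n[::-1]

-- ===== PORT B =====
-- B's while loop: walk i leftward while i >= 0 and s[i].isalpha().
def pvBLoop (cs : List Char) (i : Int) : Int :=
  if _h0 : 0 ≤ i then
    match cs[i.toNat]? with
    | some ch => if PySem.Chars.isalpha ch then pvBLoop cs (i - 1) else i
    | none => i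
  else i
termination_by (i + 1).toNat
decreasing_by omega

def exclamation_alt (s : String) : String :=
  let cs := s.toList
  let idx := PySem.Chars.rfind cs ['!']
  if idx = -1 then ""
  else
    let i := pvBLoop cs (idx - 1)
    String.ofList (PySem.List.slice cs (some (i + 1)) (some (idx + 1)))

-- ===== PRECONDITION & SPEC =====
def Spec_exclamation (s : String) (out : String) : Prop := out = exclamation_alt s
instance (s : String) (out : String) : Decidable (Spec_exclamation s out) := by unfold Spec_exclamation; infer_instance

-- ===== CLAIM (what is proved, stated in full; the proofs are below) =====
def Claim_equal_exclamation : Prop := ∀ (s : String), Dom_exclamation s → Spec_exclamation s (exclamation s)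

-- ===== LEMMAS AND PROOFS =====

theorem singleton_isPrefixOf (c : Char) (t : List Char) :
    [c].isPrefixOf t = true ↔ t.head? = some c := by
  cases t with
  | nil => simp [List.isPrefixOf]
  | cons h tl => simp [List.isPrefixOf]; exact eq_comm

theorem drop_isPrefixOf (L : List Char) (c : Char) (i : Nat) :
    [c].isPrefixOf (L.drop i) = true ↔ L[i]? = some c := by
  rw [singleton_isPrefixOf, List.head?_drop]

theorem rfind_go_neg (L : List Char) (c : Char) (j : Nat)
    (h : ∀ i, i ≤ j → L[i]? ≠ some c) :
    PySem.Chars.rfind.go L [c] j = -1 := by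
  induction j with
  | zero =>
    rw [PySem.Chars.rfind.go]
    rw [if_neg]
    intro hp
    have := (singleton_isPrefixOf c L).mp hp
    rw [List.head?_eq_getElem?] at this
    exact h 0 le_rfl this
  | succ j ih =>
    rw [PySem.Chars.rfind.go]
    rw [if_neg, ih (fun i hi => h i (Nat.le_succ_of_le hi))]
    intro hp
    exact h (j+1) le_rfl ((drop_isPrefixOf L c (j+1)).mp hp)

theorem rfind_go_hit (L : List Char) (c : Char) (j k : Nat)
    (hk : k ≤ j) (hc : L[k]? = some c)
    (hmax : ∀ i, k < i → i ≤ j → L[i]? ≠ some c) :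
    PySem.Chars.rfind.go L [c] j = (k : Int) := by
  induction j with
  | zero =>
    interval_cases k
    rw [PySem.Chars.rfind.go]
    rw [if_pos ((singleton_isPrefixOf c L).mpr (by rw [List.head?_eq_getElem?]; exact hc))]
    rfl
  | succ j ih =>
    rw [PySem.Chars.rfind.go]
    rcases Nat.eq_or_lt_of_le hk with he | hlt
    · rw [if_pos ((drop_isPrefixOf L c (j+1)).mpr (he ▸ hc))]
      simp [he]
    · rw [if_neg, ih (by omega) (fun i h1 h2 => hmax i h1 (Nat.le_succ_of_le h2))]
      intro hp
      exact hmax (j+1) hlt le_rfl ((drop_isPrefixOf L c (j+1)).mp hp)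

theorem pvALoop_eq (r : List Char) (e : Nat) (n : List Char) (he : e < r.length) :
    pvALoop r e n = n ++ r[e] :: (r.drop (e + 1)).takeWhile PySem.Chars.isalpha := by
  fun_induction pvALoop r e n with
  | case1 e n he' n' ch hch halpha ih =>
    have h1 : e + 1 < r.length := (List.getElem?_eq_some_iff.mp hch).1
    have hch' : ch = r[e+1] := ((List.getElem?_eq_some_iff.mp hch).2).symm
    rw [ih h1, List.drop_eq_getElem_cons h1, List.takeWhile_cons_of_pos (hch' ▸ halpha)]
    simp [n']
  | case2 e n he' n' ch hch halpha =>
    have h1 : e + 1 < r.length := (List.getElem?_eq_some_iff.mp hch).1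
    have hch' : ch = r[e+1] := ((List.getElem?_eq_some_iff.mp hch).2).symm
    rw [List.drop_eq_getElem_cons h1]
    rw [List.takeWhile_cons_of_neg (hch' ▸ halpha)]
  | case3 e n he' n' hch =>
    have h1 : r.length ≤ e + 1 := by
      by_contra hlt
      exact absurd hch (by simp [List.getElem?_eq_getElem (by omega : e + 1 < r.length)])
    rw [pvALoop, dif_neg (by omega), List.drop_eq_nil_of_le h1]
    simp [n']
  | case4 e n he' => exact absurd he he'


theorem pvBLoop_eq (cs : List Char) (k : Nat) (hk : k ≤ cs.length) :
    pvBLoop cs ((k : Int) - 1) =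
      (k : Int) - 1 - (((cs.take k).reverse).takeWhile PySem.Chars.isalpha).length := by
  induction k with
  | zero => rw [pvBLoop]; simp
  | succ k ih =>
    have hk' : k < cs.length := hk
    have hi : ((k + 1 : Nat) : Int) - 1 = (k : Int) := by push_cast; ring
    rw [hi, pvBLoop]
    have htn : ((k : Int)).toNat = k := by omega
    rw [dif_pos (by positivity), htn, List.getElem?_eq_getElem hk']
    have htake : (cs.take (k+1)).reverse = cs[k] :: (cs.take k).reverse := by
      rw [List.take_add_one, List.getElem?_eq_getElem hk']
      simp
    rw [htake]
    by_cases hp : PySem.Chars.isalpha cs[k] = true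
    · simp only [hp, if_true, List.takeWhile_cons_of_pos hp]
      have := ih (by omega)
      rw [show (k : Int) - 1 = ((k : Nat) : Int) - 1 from rfl] at this
      rw [this]
      simp
      ring
    · simp only [hp, List.takeWhile_cons_of_neg hp]
      simp

theorem getElem?_of_singleton_prefix {c : Char} {xs : List Char} {i : Nat}
    (h : [c] <+: xs.drop i) : xs[i]? = some c := by
  rw [← List.head?_drop]
  rcases h with ⟨tl, htl⟩
  rw [← htl]; rfl

theorem singleton_prefix_drop {c : Char} {xs : List Char} {i : Nat}
    (h : xs[i]? = some c) : [c] <+: xs.drop i := by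
  rw [← List.head?_drop] at h
  cases hd : xs.drop i with
  | nil => rw [hd] at h; cases h
  | cons a tl => rw [hd] at h; simp at h; exact ⟨tl, by simp [h]⟩

theorem pvAgree (s : String) : exclamation s = exclamation_alt s := by
  unfold exclamation exclamation_alt
  dsimp only
  set L := s.toList with hL
  set r := L.reverse with hr
  have hrlen : r.length = L.length := by simp [hr]
  by_cases hfound : PySem.Chars.find r ['!'] = -1
  · -- no '!' anywhere
    have hnot : ¬ ('!' ∈ r) := by
      have := (PySem.Chars.find_eq_neg_one_iff (s := r) (sub := ['!'])).mp hfound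
      exact fun hm => this ((List.singleton_infix_iff '!' r).mpr hm)
    have hnotL : ∀ i : Nat, L[i]? ≠ some '!' := by
      intro i hi
      exact hnot (by
        have : '!' ∈ L := List.mem_of_getElem? hi
        simpa [hr] using this)
    have hrf : PySem.Chars.rfind L ['!'] = -1 := by
      rw [PySem.Chars.rfind]
      exact rfind_go_neg L '!' L.length (fun i _ => hnotL i)
    simp [hfound, hrf]
  · -- '!' found
    have hnn : 0 ≤ PySem.Chars.find r ['!'] := by
      have := PySem.Chars.neg_one_le_find r ['!']
      omega
    obtain ⟨hpre, hmin⟩ := PySem.Chars.find_spec (s := r) (sub := ['!']) hnn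
    set e0 := (PySem.Chars.find r ['!']).toNat with he0
    have hre0 : r[e0]? = some '!' := getElem?_of_singleton_prefix hpre
    have he0lt : e0 < r.length := List.getElem?_eq_some_iff.mp hre0 |>.1
    have hNpos : 0 < L.length := by omega
    set idx := L.length - 1 - e0 with hidx
    have hLidx : L[idx]? = some '!' := by
      have h2 := List.getElem?_reverse (l := L) (show e0 < L.length by omega)
      rw [← hr, ← hidx] at h2
      rw [← h2]; exact hre0
    have hmaxL : ∀ i : Nat, idx < i → i ≤ L.length → L[i]? ≠ some '!' := by
      intro i h1 h2 hi
      have hiN : i < L.length := by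
        rcases Nat.lt_or_ge i L.length with h | h
        · exact h
        · rw [List.getElem?_eq_none (by omega)] at hi; cases hi
      have hdrop : r[L.length - 1 - i]? = some '!' := by
        have h3 := List.getElem?_reverse (l := L) (show L.length - 1 - i < L.length by omega)
        have h4 : L.length - 1 - (L.length - 1 - i) = i := by omega
        rw [← hr, h4] at h3
        rw [h3]; exact hi
      have hlt : L.length - 1 - i < e0 := by omega
      exact hmin _ hlt (singleton_prefix_drop hdrop)
    have hrf : PySem.Chars.rfind L ['!'] = (idx : Int) := by
      rw [PySem.Chars.rfind]
      exact rfind_go_hit L '!' L.length idx (by omega) hLidx hmaxL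
    have hidxle : idx ≤ L.length := by omega
    have hidxlt : idx < L.length := by omega
    set W := ((L.take idx).reverse).takeWhile PySem.Chars.isalpha with hW
    set t := W.length with ht
    have htle : t ≤ idx := by
      have h1 := List.IsPrefix.length_le (List.takeWhile_prefix (l := (L.take idx).reverse) PySem.Chars.isalpha)
      simpa [ht, hW, List.length_take, Nat.min_eq_left hidxle] using h1
    rw [if_pos hfound, hrf, if_neg (by omega : ¬ ((idx : Int) = -1))]
    rw [pvALoop_eq r e0 [] (by omega : e0 < r.length)]
    have hrchar : r[e0]'(by omega) = '!' := by
      have := List.getElem?_eq_some_iff.mp hre0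
      exact this.2
    have hLchar : L[idx]'hidxlt = '!' := by
      have := List.getElem?_eq_some_iff.mp hLidx
      exact this.2
    have hdropr : r.drop (e0 + 1) = (L.take idx).reverse := by
      rw [hr, List.drop_reverse]
      congr 2
      omega
    have hB := pvBLoop_eq L idx hidxle
    rw [hB]
    have harith : (idx : Int) - 1 - (((L.take idx).reverse).takeWhile PySem.Chars.isalpha).length + 1 = (idx : Int) - t := by
      rw [← hW, ← ht]; ring
    rw [harith]
    rw [PySem.List.slice_toNat (xs := L) (a := (idx : Int) - (t : Int)) (b := (idx : Int) + 1) (by omega) (by omega)]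
    have h5 : ((idx : Int) - t).toNat = idx - t := by omega
    rw [h5]
    have h6 : ((idx : Int) + 1).toNat - (idx - t) = t + 1 := by omega
    rw [h6]
    have hWrev : W.reverse = (L.take idx).drop (idx - t) := by
      have hWtake : W = ((L.take idx).reverse).take t :=
        List.prefix_iff_eq_take.mp (List.takeWhile_prefix _)
      rw [hWtake, List.take_reverse, List.reverse_reverse]
      congr 1
      rw [List.length_take]
      omega
    have hsplit : L.drop (idx - t) = W.reverse ++ L.drop idx := by
      conv_lhs => rw [← List.take_append_drop idx L]
      rw [List.drop_append_of_le_length (by rw [List.length_take]; omega), ← hWrev]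
    have hlenW : W.reverse.length = t := by simp [ht]
    have htake1 : (L.drop idx).take 1 = ['!'] := by
      rw [List.drop_eq_getElem_cons hidxlt]
      simp [hLchar]
    have hfinal : (L.drop (idx - t)).take (t + 1) = W.reverse ++ ['!'] := by
      rw [hsplit, ← hlenW, List.take_append]
      rw [List.take_of_length_le (by omega)]
      have h7 : W.reverse.length + 1 - W.reverse.length = 1 := by omega
      rw [h7, htake1]
    rw [hfinal, hrchar, hdropr, ← hW]
    simp

-- ===== VERDICT (by name: the statement is the Claim_ definition above) =====
theorem exclamation_spec : Claim_equal_exclamation := by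
  intro s _
  unfold Spec_exclamation
  exact pvAgree s
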